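-- pv_equiv track=rewrite | github.com/R0hit-Yadav/CN_Project | Parity bit checker,bit & byte stuffing/CN_Project.py | Needs_Bit_Stuffing
-- ===== SOURCE A (Python) =====
-- def Needs_Bit_Stuffing(data):
--     consecutive_ones = 0
--     for bit in data:
--         if bit == '1':
--             consecutive_ones += 1
--             if consecutive_ones == 6:
--                 return True  # Stuffing needed
--         else:
--             consecutive_ones = 0
--     return False  # No stuffing needed
-- ===== SOURCE B (Python) =====
-- def Needs_Bit_Stuffing(data):
--     return "111111" in data
-- ===== Notes on version B (the rewrite author's own statement) =====
-- stated objective: faster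
-- what changed: Replaces the explicit running-counter loop (reset on zero, early return at six) with a single substring-containment test for a run of six one-characters, delegating the scan to the interpreter's C-level substring search.
import Mathlib
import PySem

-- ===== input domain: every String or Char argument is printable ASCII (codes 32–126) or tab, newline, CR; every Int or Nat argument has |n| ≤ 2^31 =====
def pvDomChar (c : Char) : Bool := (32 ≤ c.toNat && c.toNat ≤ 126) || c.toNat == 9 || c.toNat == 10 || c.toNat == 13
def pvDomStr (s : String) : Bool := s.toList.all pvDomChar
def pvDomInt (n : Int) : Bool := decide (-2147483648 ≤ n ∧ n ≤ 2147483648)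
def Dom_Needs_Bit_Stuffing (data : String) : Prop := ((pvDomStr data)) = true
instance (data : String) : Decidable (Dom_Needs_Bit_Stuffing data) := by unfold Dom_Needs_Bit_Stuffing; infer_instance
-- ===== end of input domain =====

-- B replaces A's running-counter loop by a single substring test "111111" in data; objective: idiomatic.

-- ===== PORT A =====
-- the for-loop with early 'return True': recursion over the chars carrying consecutive_ones
def NBS_loop : List Char → Nat → Bool
  | [], _ => false
  | bit :: rest, consecutive_ones =>
    if bit == '1' then
      if consecutive_ones + 1 == 6 then true
      else NBS_loop rest (consecutive_ones + 1)
    else NBS_loop rest 0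

def Needs_Bit_Stuffing (data : String) : Bool := NBS_loop data.toList 0

-- ===== PORT B =====
def Needs_Bit_Stuffing_alt (data : String) : Bool := PySem.Str.isIn "111111" data

-- ===== PRECONDITION & SPEC =====
def Spec_Needs_Bit_Stuffing (data : String) (out : Bool) : Prop := out = Needs_Bit_Stuffing_alt data
instance (data : String) (out : Bool) : Decidable (Spec_Needs_Bit_Stuffing data out) := by unfold Spec_Needs_Bit_Stuffing; infer_instance

-- ===== CLAIM (what is proved, stated in full; the proofs are below) =====
def Claim_equal_Needs_Bit_Stuffing : Prop := ∀ (data : String), Dom_Needs_Bit_Stuffing data → Spec_Needs_Bit_Stuffing data (Needs_Bit_Stuffing data)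

-- ===== LEMMAS AND PROOFS =====

theorem rep_prefix_cons_one (m : Nat) (rest : List Char) :
    List.replicate (m + 1) '1' <+: ('1' :: rest) ↔ List.replicate m '1' <+: rest := by
  simp [List.replicate_succ, List.cons_prefix_cons]

theorem rep_prefix_mono {a b : Nat} {rest : List Char}
    (h : List.replicate a '1' <+: rest) (hb : b ≤ a) : List.replicate b '1' <+: rest := by
  refine List.IsPrefix.trans ?_ h
  exact ⟨List.replicate (a - b) '1', by rw [← List.replicate_add]; congr 1; omega⟩

theorem rep_prefix_cons_ne {m : Nat} {c : Char} {rest : List Char} (hc : c ≠ '1') :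
    ¬ (List.replicate (m + 1) '1' <+: (c :: rest)) := by
  rw [List.replicate_succ, List.cons_prefix_cons]
  rintro ⟨h1, -⟩
  exact hc h1.symm

-- invariant of A's loop: with counter k < 6 it succeeds iff the remaining chars start with
-- the missing 6-k ones, or a full run of six ones occurs further on
theorem NBS_loop_iff (l : List Char) : ∀ k : Nat, k < 6 →
    (NBS_loop l k = true ↔
      (List.replicate (6 - k) '1' <+: l ∨ List.replicate 6 '1' <:+: l)) := by
  induction l with
  | nil =>
    intro k hk
    simp only [NBS_loop, List.prefix_nil, List.infix_nil]
    constructor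
    · intro h; cases h
    · rintro (h | h) <;> (rw [List.replicate_eq_nil_iff] at h; omega)
  | cons c rest ih =>
    intro k hk
    by_cases hc : c = '1'
    · subst hc
      by_cases h6 : k + 1 = 6
      · have hk5 : k = 5 := by omega
        subst hk5
        simp only [NBS_loop]
        constructor
        · intro _
          left
          show List.replicate 1 '1' <+: _
          simp [List.replicate_succ]
        · intro _; rfl
      · have hk1 : k + 1 < 6 := by omega
        have hstep : NBS_loop ('1' :: rest) k = NBS_loop rest (k + 1) := by
          simp only [NBS_loop, beq_self_eq_true, if_pos]
          rw [if_neg (by simpa using h6)]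
        rw [hstep, ih (k + 1) hk1]
        have hA : List.replicate (6 - k) '1' <+: ('1' :: rest) ↔
            List.replicate (6 - (k + 1)) '1' <+: rest := by
          rw [show (6 : Nat) - k = (6 - (k + 1)) + 1 by omega]
          exact rep_prefix_cons_one _ _
        have hB : List.replicate 6 '1' <:+: ('1' :: rest) ↔
            (List.replicate 6 '1' <+: ('1' :: rest) ∨ List.replicate 6 '1' <:+: rest) :=
          List.infix_cons_iff
        have hC : List.replicate 6 '1' <+: ('1' :: rest) ↔ List.replicate 5 '1' <+: rest :=
          rep_prefix_cons_one 5 rest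
        constructor
        · rintro (hp | hi)
          · exact Or.inl (hA.mpr hp)
          · exact Or.inr (hB.mpr (Or.inr hi))
        · rintro (hp | hi)
          · exact Or.inl (hA.mp hp)
          · rcases hB.mp hi with hp6 | hi'
            · exact Or.inl (rep_prefix_mono (hC.mp hp6) (by omega))
            · exact Or.inr hi'
    · have hstep : NBS_loop (c :: rest) k = NBS_loop rest 0 := by
        simp only [NBS_loop]
        rw [if_neg (by simpa using hc)]
      rw [hstep, ih 0 (by omega)]
      simp only [Nat.sub_zero]
      constructor
      · rintro (hp | hi)
        · exact Or.inr (List.infix_cons_iff.mpr (Or.inr hp.isInfix))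
        · exact Or.inr (List.infix_cons_iff.mpr (Or.inr hi))
      · rintro (hp | hi)
        · exact absurd (rep_prefix_mono hp (show (1:Nat) ≤ 6 - k by omega))
            (rep_prefix_cons_ne hc (m := 0))
        · rcases List.infix_cons_iff.mp hi with hp6 | hi'
          · exact absurd (rep_prefix_mono hp6 (show (1:Nat) ≤ 6 by omega))
              (rep_prefix_cons_ne hc (m := 0))
          · exact Or.inr hi'

-- ===== VERDICT (by name: the statement is the Claim_ definition above) =====
theorem Needs_Bit_Stuffing_spec : Claim_equal_Needs_Bit_Stuffing := by
  intro data _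
  show Needs_Bit_Stuffing data = Needs_Bit_Stuffing_alt data
  rw [Bool.eq_iff_iff]
  rw [show Needs_Bit_Stuffing_alt data = PySem.Str.isIn "111111" data from rfl,
      PySem.Str.isIn_iff_infix]
  rw [show Needs_Bit_Stuffing data = NBS_loop data.toList 0 from rfl,
      NBS_loop_iff data.toList 0 (by omega)]
  rw [show ("111111" : String).toList = List.replicate 6 '1' by decide]
  simp only [Nat.sub_zero]
  constructor
  · rintro (hp | hi)
    · exact hp.isInfix
    · exact hi
  · exact Or.inr
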